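-- pv_equiv track=rewrite | github.com/HsiaSharpie/IMDB_sentiment-analysis | preprocess.py | seperate_datasts
-- ===== SOURCE A (Python) =====
-- def seperate_datasts(subset_arr):
--     train_review = []
--     train_sentiment = []
--
--     val_review = []
--     val_sentiment = []
--
--     test_review = []
--     test_sentiment = []
--
--     for data in subset_arr:
--         if data['split'] == 'train':
--             train_review.append(data['review'])
--             train_sentiment.append(data['sentiment'])
--
--         if data['split'] == 'val':
--             val_review.append(data['review'])
--             val_sentiment.append(data['sentiment'])
--
--         if data['split'] == 'test':
--             test_review.append(data['review'])
--             test_sentiment.append(data['sentiment'])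
--
--     return train_review, train_sentiment, val_review, val_sentiment, test_review, test_sentiment
-- ===== SOURCE B (Python) =====
-- def seperate_datasts(subset_arr):
--     def pick(split, field):
--         return [d[field] for d in subset_arr if d['split'] == split]
--     return (pick('train', 'review'), pick('train', 'sentiment'),
--             pick('val', 'review'), pick('val', 'sentiment'),
--             pick('test', 'review'), pick('test', 'sentiment'))
-- ===== Notes on version B (the rewrite author's own statement) =====
-- stated objective: idiomatic
-- what changed: Replaces the single accumulating loop with three-way branch state by six independent filtering comprehensions (one scan per output list via a pick helper).
import Mathlib
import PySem

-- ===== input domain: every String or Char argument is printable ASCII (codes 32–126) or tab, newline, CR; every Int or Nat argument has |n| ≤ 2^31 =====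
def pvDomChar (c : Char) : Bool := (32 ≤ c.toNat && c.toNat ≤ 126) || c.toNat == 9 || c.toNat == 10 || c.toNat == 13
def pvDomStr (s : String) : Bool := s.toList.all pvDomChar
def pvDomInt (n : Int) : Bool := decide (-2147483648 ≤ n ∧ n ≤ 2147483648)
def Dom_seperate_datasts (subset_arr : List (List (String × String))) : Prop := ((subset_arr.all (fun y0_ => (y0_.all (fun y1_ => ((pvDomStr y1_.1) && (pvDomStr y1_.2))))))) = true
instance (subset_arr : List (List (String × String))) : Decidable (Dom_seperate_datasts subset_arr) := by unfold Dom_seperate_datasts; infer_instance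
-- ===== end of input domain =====

-- B replaces A's single accumulating loop (six mutable lists, three branches) by six
-- independent filtering scans (one comprehension per output list); same cost, more idiomatic.

-- ===== PORT A =====
-- one iteration of A's loop body over the six accumulators (key lookups total via getD;
-- Pre_ guarantees the keys are present exactly where Python A reads them)
def pvAStep (st : List String × List String × List String × List String × List String × List String)
    (data : List (String × String)) :
    List String × List String × List String × List String × List String × List String :=
  match st with
  | (tr, ts, vr, vs, er, es) =>
    let d := PySem.Dict.mk data
    let st1 := if d.getD "split" "" = "train"
      then (tr ++ [d.getD "review" ""], ts ++ [d.getD "sentiment" ""], vr, vs, er, es)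
      else (tr, ts, vr, vs, er, es)
    match st1 with
    | (tr, ts, vr, vs, er, es) =>
      let st2 := if d.getD "split" "" = "val"
        then (tr, ts, vr ++ [d.getD "review" ""], vs ++ [d.getD "sentiment" ""], er, es)
        else (tr, ts, vr, vs, er, es)
      match st2 with
      | (tr, ts, vr, vs, er, es) =>
        if d.getD "split" "" = "test"
          then (tr, ts, vr, vs, er ++ [d.getD "review" ""], es ++ [d.getD "sentiment" ""])
          else (tr, ts, vr, vs, er, es)

def seperate_datasts (subset_arr : List (List (String × String))) : List String × List String × List String × List String × List String × List String :=
  subset_arr.foldl pvAStep ([], [], [], [], [], [])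

-- ===== PORT B =====
-- pick(split, field) = [d[field] for d in subset_arr if d['split'] == split]
def pvPick (subset_arr : List (List (String × String))) (split field : String) : List String :=
  subset_arr.filterMap (fun data =>
    let d := PySem.Dict.mk data
    if d.getD "split" "" = split then some (d.getD field "") else none)

def seperate_datasts_alt (subset_arr : List (List (String × String))) : List String × List String × List String × List String × List String × List String :=
  (pvPick subset_arr "train" "review", pvPick subset_arr "train" "sentiment",
   pvPick subset_arr "val" "review", pvPick subset_arr "val" "sentiment",
   pvPick subset_arr "test" "review", pvPick subset_arr "test" "sentiment")

-- ===== PRECONDITION & SPEC =====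
-- Pre_ excludes exactly the inputs where Python A raises KeyError: a record without a
-- 'split' key, or a record whose split is train/val/test but lacks 'review' or 'sentiment'.
def Pre_seperate_datasts (subset_arr : List (List (String × String))) : Prop :=
  ∀ data ∈ subset_arr,
    ((PySem.Dict.mk data).get? "split").isSome = true ∧
    ((PySem.Dict.mk data).getD "split" "" = "train" ∨
     (PySem.Dict.mk data).getD "split" "" = "val" ∨
     (PySem.Dict.mk data).getD "split" "" = "test" →
       ((PySem.Dict.mk data).get? "review").isSome = true ∧
       ((PySem.Dict.mk data).get? "sentiment").isSome = true)
instance (subset_arr : List (List (String × String))) : Decidable (Pre_seperate_datasts subset_arr) := by unfold Pre_seperate_datasts; infer_instance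

def pvWitness_seperate_datasts : (List (List (String × String))) :=
  [[("split", "train"), ("review", "good movie"), ("sentiment", "positive")],
   [("split", "unsup")]]

def Spec_seperate_datasts (subset_arr : List (List (String × String))) (out : List String × List String × List String × List String × List String × List String) : Prop := out = seperate_datasts_alt subset_arr
instance (subset_arr : List (List (String × String))) (out : List String × List String × List String × List String × List String × List String) : Decidable (Spec_seperate_datasts subset_arr out) := by unfold Spec_seperate_datasts; infer_instance

-- ===== CLAIM (what is proved, stated in full; the proofs are below) =====
def Claim_equal_seperate_datasts : Prop := ∀ (subset_arr : List (List (String × String))), Dom_seperate_datasts subset_arr → Pre_seperate_datasts subset_arr → Spec_seperate_datasts subset_arr (seperate_datasts subset_arr)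

-- ===== LEMMAS AND PROOFS =====

-- loop invariant: A's fold from any accumulator state appends exactly B's picks
theorem pvFold_eq (l : List (List (String × String)))
    (tr ts vr vs er es : List String) :
    l.foldl pvAStep (tr, ts, vr, vs, er, es) =
      (tr ++ pvPick l "train" "review", ts ++ pvPick l "train" "sentiment",
       vr ++ pvPick l "val" "review", vs ++ pvPick l "val" "sentiment",
       er ++ pvPick l "test" "review", es ++ pvPick l "test" "sentiment") := by
  induction l generalizing tr ts vr vs er es with
  | nil => simp [pvPick]
  | cons d l ih =>
    simp only [List.foldl_cons, pvAStep, pvPick, List.filterMap_cons]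
    split_ifs with h1 h2 h3 <;> simp_all [pvPick]

-- ===== VERDICT (by name: the statement is the Claim_ definition above) =====
theorem seperate_datasts_spec : Claim_equal_seperate_datasts := by
  intro subset_arr _ _
  unfold Spec_seperate_datasts seperate_datasts seperate_datasts_alt
  simpa using pvFold_eq subset_arr [] [] [] [] [] []
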